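-- pv_equiv track=rewrite | github.com/vsrinivas/fuchsia | scripts/gn/gn_util.py | is_visible_to
-- ===== SOURCE A (Python) =====
-- import itertools
--
-- def is_visible_to(target, visibility):
--     """Returns whether dst_target is visible to src_target."""
--     target_dirs, _, target_label = target.partition(":")
--     visibility_dirs, _, visibility_label = visibility.partition(":")
--     for target_dir, visibility_dir in itertools.zip_longest(
--             target_dirs.split("/"), visibility_dirs.split("/")):
--         if visibility_dir == "*":
--             return True
--         if target_dir != visibility_dir:
--             return False
--     if visibility_label == "*":
--         return True
--     return target_label == visibility_label
-- ===== SOURCE B (Python) =====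
-- def is_visible_to(target, visibility):
--     """Returns whether dst_target is visible to src_target."""
--     target_dirs, _, target_label = target.partition(":")
--     visibility_dirs, _, visibility_label = visibility.partition(":")
--     t = target_dirs.split("/")
--     v = visibility_dirs.split("/")
--     if "*" in v:
--         i = v.index("*")
--         return t[:i] == v[:i]
--     if t != v:
--         return False
--     return visibility_label == "*" or target_label == visibility_label
-- ===== Notes on version B (the rewrite author's own statement) =====
-- stated objective: simpler
-- what changed: Replaces the interleaved zip_longest branch-loop with a wildcard-locate-then-slice-compare form: find the first '*' component of the visibility path and compare prefixes, otherwise compare whole component lists and then labels.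
import Mathlib
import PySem

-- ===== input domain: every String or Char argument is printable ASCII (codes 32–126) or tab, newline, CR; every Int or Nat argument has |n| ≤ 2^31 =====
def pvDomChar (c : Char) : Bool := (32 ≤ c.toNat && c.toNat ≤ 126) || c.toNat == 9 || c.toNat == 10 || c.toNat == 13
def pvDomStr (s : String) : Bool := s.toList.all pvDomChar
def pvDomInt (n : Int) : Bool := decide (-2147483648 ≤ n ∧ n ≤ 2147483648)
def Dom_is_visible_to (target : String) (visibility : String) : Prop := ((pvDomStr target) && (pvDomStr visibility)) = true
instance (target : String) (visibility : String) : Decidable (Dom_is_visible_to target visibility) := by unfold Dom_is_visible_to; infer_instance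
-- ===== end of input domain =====

-- B changes only the shape: wildcard-locate-then-prefix-compare instead of A's zip_longest branch-loop (objective: simpler).

-- ===== PORT A =====
-- s.partition(c): (piece before the first c, piece after it); '' after when c is absent.
-- Hand-ported (no PySem partition): exact — takeWhile (≠ c) is the text before the first c,
-- drop (that length + 1) is the text after it (drop past the end gives [] = '' like Python).
def pvPartition (s : String) (c : Char) : String × String :=
  let l := s.toList
  let pre := l.takeWhile (fun x => x ≠ c)
  (String.ofList pre, String.ofList (l.drop (pre.length + 1)))

-- s.split("/"): the separator is the nonempty literal "/", so this is exactly Chars.splitOn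
def pvSplitSlash (s : String) : List String :=
  (PySem.Chars.splitOn s.toList "/".toList).map String.ofList

-- the 'for … in itertools.zip_longest(…)' loop plus the code after it, as structural
-- recursion over the two component lists (None-padding = the unequal-length cases)
def pvVisLoop (ts vs : List String) (tl vl : String) : Bool :=
  match ts, vs with
  | [], [] => if vl = "*" then true else decide (tl = vl)
  | [], v :: _ => if v = "*" then true else false          -- target side is None ≠ v
  | _ :: _, [] => false                                    -- visibility side is None: not '*', and ≠ t
  | t :: ts', v :: vs' => if v = "*" then true else if t ≠ v then false else pvVisLoop ts' vs' tl vl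

def is_visible_to (target : String) (visibility : String) : Bool :=
  let tp := pvPartition target ':'
  let vp := pvPartition visibility ':'
  pvVisLoop (pvSplitSlash tp.1) (pvSplitSlash vp.1) tp.2 vp.2

-- ===== PORT B =====
-- '"*" in v' + 'v.index("*")' ported together as PySem.List.index? (first occurrence); t[:i] with i : Nat is List.take i
def is_visible_to_alt (target : String) (visibility : String) : Bool :=
  let tp := pvPartition target ':'
  let vp := pvPartition visibility ':'
  let t := pvSplitSlash tp.1
  let v := pvSplitSlash vp.1
  match PySem.List.index? v "*" with
  | some i => decide (t.take i = v.take i)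
  | none => if t ≠ v then false else (decide (vp.2 = "*") || decide (tp.2 = vp.2))

-- ===== PRECONDITION & SPEC =====
def Spec_is_visible_to (target : String) (visibility : String) (out : Bool) : Prop := out = is_visible_to_alt target visibility
instance (target : String) (visibility : String) (out : Bool) : Decidable (Spec_is_visible_to target visibility out) := by unfold Spec_is_visible_to; infer_instance

-- ===== CLAIM (what is proved, stated in full; the proofs are below) =====
def Claim_equal_is_visible_to : Prop := ∀ (target : String) (visibility : String), Dom_is_visible_to target visibility → Spec_is_visible_to target visibility (is_visible_to target visibility)

-- ===== LEMMAS AND PROOFS =====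
theorem pvVisLoop_eq (vs ts : List String) (tl vl : String) :
    pvVisLoop ts vs tl vl =
      (match PySem.List.index? vs "*" with
       | some i => decide (ts.take i = vs.take i)
       | none => if ts ≠ vs then false else (decide (vl = "*") || decide (tl = vl))) := by
  induction vs generalizing ts with
  | nil =>
    cases ts with
    | nil => simp [pvVisLoop, PySem.List.index?]
    | cons t ts' => simp [pvVisLoop, PySem.List.index?]
  | cons v vs' ih =>
    by_cases hv : v = "*"
    · subst hv
      rw [PySem.List.index?_cons_self]
      cases ts <;> simp [pvVisLoop]
    · have hidx : PySem.List.index? (v :: vs') "*" = (PySem.List.index? vs' "*").map (· + 1) :=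
        PySem.List.index?_cons_of_ne vs' hv
      cases ts with
      | nil =>
        rw [hidx]
        cases h : PySem.List.index? vs' "*" with
        | none => simp [pvVisLoop, hv]
        | some i => simp [pvVisLoop, hv, List.take_succ_cons]
      | cons t ts' =>
        by_cases ht : t = v
        · subst ht
          rw [hidx]
          have := ih ts'
          cases h : PySem.List.index? vs' "*" with
          | none =>
            rw [h] at this
            simp only [pvVisLoop, hv, if_false, Option.map_none, this]
            by_cases he : ts' = vs' <;> simp [he]
          | some i =>
            rw [h] at this
            simp only [pvVisLoop, hv, if_false, Option.map_some]
            simp [this, List.take_succ_cons]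
        · rw [hidx]
          cases h : PySem.List.index? vs' "*" with
          | none => simp [pvVisLoop, hv, ht]
          | some i => simp [pvVisLoop, hv, ht, List.take_succ_cons]

-- ===== VERDICT (by name: the statement is the Claim_ definition above) =====
theorem is_visible_to_spec : Claim_equal_is_visible_to := by
  intro target visibility _
  unfold Spec_is_visible_to is_visible_to is_visible_to_alt
  exact pvVisLoop_eq _ _ _ _
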